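-- pv_equiv track=rewrite | github.com/Zhanna2603/GOA-course-11 | Day 66/Homework/codewars7.py | sum_no_duplicates
-- ===== SOURCE A (Python) =====
-- def sum_no_duplicates(l):
--     seen = set()
--     duplicates = set()
--
--     for num in l:
--         if num in seen:
--             duplicates.add(num)
--         else:
--             seen.add(num)
--     return sum(num for num in seen if num not in duplicates)
-- ===== SOURCE B (Python) =====
-- def sum_no_duplicates(l):
--     s = sorted(l)
--     n = len(s)
--     total = 0
--     i = 0
--     while i < n:
--         j = i + 1
--         while j < n and s[j] == s[i]:
--             j += 1
--         if j == i + 1: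
--             total += s[i]
--         i = j
--     return total
-- ===== Notes on version B (the rewrite author's own statement) =====
-- stated objective: alternative
-- what changed: Replaces A's hash-set bookkeeping (seen/duplicates membership sets plus a set-difference sum) with a sort-then-scan algorithm: sort the list, walk it with two indices grouping runs of equal elements, and add the head of every run of length one.
import Mathlib
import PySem

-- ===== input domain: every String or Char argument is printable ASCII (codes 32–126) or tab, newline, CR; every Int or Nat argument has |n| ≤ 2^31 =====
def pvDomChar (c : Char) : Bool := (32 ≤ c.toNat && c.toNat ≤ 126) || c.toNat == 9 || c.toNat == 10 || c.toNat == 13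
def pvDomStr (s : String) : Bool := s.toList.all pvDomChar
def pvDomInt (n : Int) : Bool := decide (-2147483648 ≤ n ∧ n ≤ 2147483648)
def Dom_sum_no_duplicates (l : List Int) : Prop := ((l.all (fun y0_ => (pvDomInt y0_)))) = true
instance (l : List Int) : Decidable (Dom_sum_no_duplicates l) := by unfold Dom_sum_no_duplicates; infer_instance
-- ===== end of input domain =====

-- B sorts the list and scans runs of equal neighbours, adding runs of length one —
-- replacing A's hash-set occurrence bookkeeping by a sort-then-scan algorithm (alternative; return value only).

-- ===== PORT A =====
-- the 'for num in l' loop carrying (seen, duplicates)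
def sumNoDupLoop : List Int → PySem.Set Int × PySem.Set Int → PySem.Set Int × PySem.Set Int
  | [], st => st
  | num :: rest, (seen, duplicates) =>
      if PySem.Set.contains seen num then
        sumNoDupLoop rest (seen, PySem.Set.add duplicates num)
      else
        sumNoDupLoop rest (PySem.Set.add seen num, duplicates)

def sum_no_duplicates (l : List Int) : Int :=
  let st := sumNoDupLoop l (PySem.Set.empty, PySem.Set.empty)
  -- sum over the set 'seen' filtered by 'num not in duplicates' (sum is order-independent)
  (st.1.filter (fun num => !(PySem.Set.contains st.2 num))).sum

-- ===== PORT B =====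
-- Source B's outer while loop over the sorted list: each step consumes one run s[i..j) of equal
-- elements (the inner 'while s[j] == s[i]' is the takeWhile/dropWhile split) and adds s[i]
-- when the run has length one.
def sumRuns : List Int → Int
  | [] => 0
  | x :: rest =>
      (if (rest.takeWhile (fun y => y == x)).isEmpty then x else 0) +
        sumRuns (rest.dropWhile (fun y => y == x))
  termination_by l => l.length
  decreasing_by
    simp only [List.length_cons]
    exact Nat.lt_succ_of_le (List.length_dropWhile_le ..)

def sum_no_duplicates_alt (l : List Int) : Int :=
  sumRuns (PySem.List.sorted l (fun x => x) false)

-- ===== PRECONDITION & SPEC =====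
def Spec_sum_no_duplicates (l : List Int) (out : Int) : Prop := out = sum_no_duplicates_alt l
instance (l : List Int) (out : Int) : Decidable (Spec_sum_no_duplicates l out) := by unfold Spec_sum_no_duplicates; infer_instance

-- ===== CLAIM (what is proved, stated in full; the proofs are below) =====
def Claim_equal_sum_no_duplicates : Prop := ∀ (l : List Int), Dom_sum_no_duplicates l → Spec_sum_no_duplicates l (sum_no_duplicates l)

-- ===== LEMMAS AND PROOFS =====

-- the first component of the loop state is just 'seen' updated with every element
theorem sumNoDupLoop_fst (l : List Int) : ∀ (s d : PySem.Set Int),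
    (sumNoDupLoop l (s, d)).1 = PySem.Set.update s l := by
  induction l with
  | nil => intro s d; rfl
  | cons num rest ih =>
    intro s d
    simp only [sumNoDupLoop]
    rw [PySem.Set.update_cons]
    by_cases h : PySem.Set.contains s num
    · rw [if_pos h, ih, PySem.Set.add_of_mem ((PySem.Set.contains_iff s num).mp h)]
    · rw [if_neg h, ih]

-- membership in the final 'duplicates' set, relative to an arbitrary start state
theorem sumNoDupLoop_snd_mem (l : List Int) : ∀ (s d : PySem.Set Int) (x : Int),
    x ∈ (sumNoDupLoop l (s, d)).2 ↔ x ∈ d ∨ (x ∈ s ∧ x ∈ l) ∨ 2 ≤ l.count x := by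
  induction l with
  | nil => intro s d x; simp [sumNoDupLoop]
  | cons num rest ih =>
    intro s d x
    simp only [sumNoDupLoop]
    by_cases h : PySem.Set.contains s num
    · rw [if_pos h, ih]
      have hnum : num ∈ s := (PySem.Set.contains_iff s num).mp h
      rw [PySem.Set.mem_add d num x]
      by_cases hx : x = num
      · subst hx
        simp [hnum, List.count_cons_self]
      · rw [List.count_cons_of_ne (Ne.symm hx)]
        simp only [List.mem_cons, hx, false_or]
        tauto
    · rw [if_neg h, ih]
      have hnum : num ∉ s := fun hm => h ((PySem.Set.contains_iff s num).mpr hm)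
      rw [PySem.Set.mem_add s num x]
      by_cases hx : x = num
      · subst hx
        rw [List.count_cons_self]
        have hcnt : x ∈ rest ↔ 0 < rest.count x := List.count_pos_iff.symm
        constructor
        · rintro (hd | (⟨_, hr⟩ | hc))
          · exact Or.inl hd
          · right; right; have := hcnt.mp hr; omega
          · right; right; omega
        · rintro (hd | (⟨hs, _⟩ | hc))
          · exact Or.inl hd
          · exact absurd hs hnum
          · right; left; exact ⟨Or.inr rfl, hcnt.mpr (by omega)⟩
      · rw [List.count_cons_of_ne (Ne.symm hx)]
        simp only [List.mem_cons, hx, false_or]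
        tauto

-- counting inside a filter
theorem count_filter' (p : Int → Bool) (a : Int) (l : List Int) :
    (l.filter p).count a = if p a then l.count a else 0 := by
  induction l with
  | nil => simp
  | cons y ys ih =>
    rw [List.filter_cons]
    by_cases hy : y = a
    · subst hy; by_cases hp : p y <;> simp [hp, ih]
    · by_cases hp : p y <;> simp [hp, hy, ih]

-- the head of a dropWhile fails the predicate
theorem dropWhile_head_false (p : Int → Bool) (l : List Int) (x : Int) (xs : List Int)
    (h : l.dropWhile p = x :: xs) : p x = false := by
  induction l with
  | nil => simp at h
  | cons y ys ih =>
    rw [List.dropWhile_cons] at h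
    split at h
    · exact ih h
    · cases h; exact eq_false_of_ne_true ‹_›

-- A's value is the sum of the elements of l occurring exactly once (each taken once)
theorem A_eq_filter_count (l : List Int) :
    sum_no_duplicates l = (l.filter (fun x => List.count x l == 1)).sum := by
  simp only [sum_no_duplicates]
  rw [sumNoDupLoop_fst]
  have hsnd : ∀ x, x ∈ (sumNoDupLoop l (PySem.Set.empty, PySem.Set.empty)).2 ↔
      2 ≤ l.count x := by
    intro x
    rw [sumNoDupLoop_snd_mem]
    simp [PySem.Set.empty]
  have hupd : PySem.Set.update PySem.Set.empty l = PySem.Set.ofList l := rfl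
  rw [hupd]
  -- rewrite the membership test into a count test
  have hcongr : (PySem.Set.ofList l).filter
        (fun num => !(PySem.Set.contains (sumNoDupLoop l (PySem.Set.empty, PySem.Set.empty)).2 num))
      = (PySem.Set.ofList l).filter (fun x => List.count x l == 1) := by
    apply List.filter_congr
    intro x hx
    have hxl : x ∈ l := (PySem.Set.mem_ofList l x).mp hx
    have h1 : 0 < List.count x l := List.count_pos_iff.mpr hxl
    by_cases h2 : 2 ≤ List.count x l
    · have hm : PySem.Set.contains (sumNoDupLoop l (PySem.Set.empty, PySem.Set.empty)).2 x :=
        (PySem.Set.contains_iff _ x).mpr ((hsnd x).mpr h2)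
      rw [hm]
      have : ¬ (List.count x l = 1) := by omega
      simp [this]
    · have hm : ¬ PySem.Set.contains (sumNoDupLoop l (PySem.Set.empty, PySem.Set.empty)).2 x :=
        fun hc => h2 ((hsnd x).mp ((PySem.Set.contains_iff _ x).mp hc))
      rw [Bool.not_eq_true] at hm
      rw [hm]
      have : List.count x l = 1 := by omega
      simp [this]
  rw [hcongr]
  -- both filtered lists are permutations of each other
  apply List.Perm.sum_eq
  rw [List.perm_iff_count]
  intro a
  rw [count_filter', count_filter']
  by_cases hp : (List.count a l == 1) = true
  · rw [if_pos hp, if_pos hp]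
    have ha1 : List.count a l = 1 := by simpa using hp
    have hal : a ∈ l := List.count_pos_iff.mp (by omega)
    rw [ha1]
    exact List.count_eq_one_of_mem (PySem.Set.nodup_ofList l) ((PySem.Set.mem_ofList l a).mpr hal)
  · rw [if_neg hp, if_neg hp]

-- sumRuns on a sorted list sums the elements whose count is one
theorem sumRuns_eq_filter_count : ∀ (n : Nat) (s : List Int), s.length ≤ n →
    s.Pairwise (· ≤ ·) → sumRuns s = (s.filter (fun x => List.count x s == 1)).sum := by
  intro n
  induction n with
  | zero =>
    intro s hn _
    have : s = [] := List.eq_nil_of_length_eq_zero (Nat.le_zero.mp hn)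
    subst this; simp [sumRuns]
  | succ m ih =>
    intro s hn hp
    cases s with
    | nil => simp [sumRuns]
    | cons x rest =>
      rw [List.pairwise_cons] at hp
      obtain ⟨hx, hrest⟩ := hp
      set t := rest.takeWhile (fun y => y == x) with ht_def
      set d := rest.dropWhile (fun y => y == x) with hd_def
      have hsplit : t ++ d = rest := List.takeWhile_append_dropWhile
      have ht : ∀ y ∈ t, y = x := by
        intro y hy
        have := List.mem_takeWhile_imp hy
        simpa using this
      have hdsub : d.Sublist rest := List.dropWhile_sublist _
      have hdp : d.Pairwise (· ≤ ·) := hrest.sublist hdsub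
      have hxd : x ∉ d := by
        intro hxm
        cases hd : d with
        | nil => rw [hd] at hxm; simp at hxm
        | cons h' d' =>
          have hph : ((h' == x) : Bool) = false := dropWhile_head_false _ rest h' d' (by rw [← hd_def, hd])
          have hne : h' ≠ x := by simpa using hph
          rw [hd] at hxm
          rcases List.mem_cons.mp hxm with h1 | h2
          · exact hne h1.symm
          · have hle1 : h' ≤ x := by
              rw [hd] at hdp
              exact (List.pairwise_cons.mp hdp).1 x h2
            have hle2 : x ≤ h' := hx h' (hdsub.subset (by rw [hd]; exact List.mem_cons_self))
            exact hne (le_antisymm hle1 hle2)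
      have hcx : List.count x (x :: rest) = t.length + 1 := by
        rw [List.count_cons_self, ← hsplit, List.count_append]
        rw [List.count_eq_length.mpr (fun b hb => (ht b hb).symm),
            List.count_eq_zero.mpr hxd]
      have hcd : ∀ y ∈ d, List.count y (x :: rest) = List.count y d := by
        intro y hy
        have hyx : y ≠ x := fun h => hxd (h ▸ hy)
        rw [List.count_cons_of_ne (Ne.symm hyx), ← hsplit, List.count_append]
        have : List.count y t = 0 := List.count_eq_zero.mpr (fun hyt => hyx (ht y hyt))
        omega
      -- the filtered list splits into the head (if its run is trivial) and d's part
      have hfilter : (x :: rest).filter (fun z => List.count z (x :: rest) == 1)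
          = (if t.isEmpty then [x] else []) ++ d.filter (fun z => List.count z d == 1) := by
        rw [List.filter_cons, ← hsplit, List.filter_append]
        have htf : t.filter (fun z => List.count z (x :: (t ++ d)) == 1) = [] := by
          apply List.filter_eq_nil_iff.mpr
          intro z hz
          have hz' := ht z hz
          subst hz'
          rw [hsplit, hcx]
          have : t ≠ [] := List.ne_nil_of_mem hz
          have : t.length ≠ 0 := fun h => this (List.eq_nil_of_length_eq_zero h)
          simp; omega
        have hdf : d.filter (fun z => List.count z (x :: (t ++ d)) == 1)
            = d.filter (fun z => List.count z d == 1) := by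
          apply List.filter_congr
          intro z hz
          rw [hsplit, hcd z hz]
        rw [htf, hdf]
        by_cases hte : t = []
        · have h1 : (List.count x (x :: (t ++ d)) == 1) = true := by
            rw [hsplit, hcx, hte]; rfl
          rw [h1, hte]; simp
        · have h1 : (List.count x (x :: (t ++ d)) == 1) = false := by
            rw [hsplit, hcx]
            have hlen : t.length ≠ 0 := fun h => hte (List.eq_nil_of_length_eq_zero h)
            simp; omega
          rw [h1]; simp [List.isEmpty_iff, hte]
      rw [sumRuns, hfilter, List.sum_append]
      have hdlen : d.length ≤ m := by
        have h1 : d.length ≤ rest.length := List.length_dropWhile_le ..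
        have h2 : rest.length ≤ m := by simpa [List.length_cons] using hn
        omega
      rw [← ih d hdlen hdp, ← hd_def, ← ht_def]
      by_cases hte : t.isEmpty <;> simp [hte]

-- ===== VERDICT (by name: the statement is the Claim_ definition above) =====
theorem sum_no_duplicates_spec : Claim_equal_sum_no_duplicates := by
  intro l _
  unfold Spec_sum_no_duplicates
  show sum_no_duplicates l = sum_no_duplicates_alt l
  rw [A_eq_filter_count]
  simp only [sum_no_duplicates_alt]
  set s := PySem.List.sorted l (fun x => x) false with hs
  have hperm : s.Perm l := PySem.List.sorted_perm ..
  have hpair : s.Pairwise (· ≤ ·) := PySem.List.sorted_pairwise ..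
  rw [sumRuns_eq_filter_count s.length s le_rfl hpair]
  have hcnt : s.filter (fun x => List.count x s == 1) = s.filter (fun x => List.count x l == 1) := by
    apply List.filter_congr
    intro x _
    rw [hperm.count_eq]
  rw [hcnt]
  exact ((hperm.filter _).sum_eq).symm
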